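-- pv_equiv track=rewrite | github.com/joseph-loeffler/SpellTower | SpellTower.py | getPrefs
-- ===== SOURCE A (Python) =====
-- def getPrefs(strList):
--     prefSet = set([])
--     for word in strList:
--         wordPrefs = [word[:i + 1] for i in range(len(word))]
--         for w in wordPrefs:
--             prefSet.add(w)
--     prefSet.add("")
--     return prefSet
-- ===== SOURCE B (Python) =====
-- def getPrefs(strList):
--     prefSet = set()
--     for word in strList:
--         acc = ""
--         for ch in word:
--             acc += ch
--             prefSet.add(acc)
--     prefSet.add("")
--     return prefSet
-- ===== Notes on version B (the rewrite author's own statement) =====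
-- stated objective: alternative
-- what changed: B builds each prefix incrementally with a running accumulator extended one character at a time inside a single char loop, instead of materializing an independent slice word[:i+1] for every index i over range(len(word)).
import Mathlib
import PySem

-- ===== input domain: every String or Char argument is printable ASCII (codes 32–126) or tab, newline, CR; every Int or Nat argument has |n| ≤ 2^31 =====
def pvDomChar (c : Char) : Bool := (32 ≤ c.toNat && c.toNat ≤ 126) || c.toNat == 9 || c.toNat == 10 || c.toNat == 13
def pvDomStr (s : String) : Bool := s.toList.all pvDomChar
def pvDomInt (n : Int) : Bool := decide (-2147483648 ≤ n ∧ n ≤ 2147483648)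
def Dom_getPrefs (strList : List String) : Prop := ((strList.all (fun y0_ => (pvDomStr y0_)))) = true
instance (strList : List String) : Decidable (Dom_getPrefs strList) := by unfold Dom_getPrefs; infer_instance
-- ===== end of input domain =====

-- B builds each prefix incrementally with a running accumulator extended one character at a
-- time, instead of slicing word[:i+1] for every i in range(len(word)); objective: alternative.

-- ===== PORT A =====
def getPrefs (strList : List String) : List String :=
  let prefSet : PySem.Set String :=
    strList.foldl (fun prefSet word =>
      let wordPrefs :=
        (PySem.List.pyRange 0 (PySem.Str.len word) 1).map
          (fun i => PySem.Str.slice word none (some (i + 1)))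
      wordPrefs.foldl PySem.Set.add prefSet) PySem.Set.empty
  PySem.Set.add prefSet ""

-- ===== PORT B =====
-- 'acc += ch' is carried as a List Char with the string made by String.ofList when added
-- (Lean's own String.append is opaque to the kernel); exact on all inputs.
def getPrefs_alt (strList : List String) : List String :=
  let prefSet : PySem.Set String :=
    strList.foldl (fun prefSet word =>
      (word.toList.foldl
        (fun st ch =>
          let acc := st.1 ++ [ch]
          (acc, PySem.Set.add st.2 (String.ofList acc)))
        (([] : List Char), prefSet)).2) PySem.Set.empty
  PySem.Set.add prefSet ""

-- ===== PRECONDITION & SPEC =====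
def Spec_getPrefs (strList : List String) (out : List String) : Prop := out = getPrefs_alt strList
instance (strList : List String) (out : List String) : Decidable (Spec_getPrefs strList out) := by unfold Spec_getPrefs; infer_instance

-- ===== CLAIM (what is proved, stated in full; the proofs are below) =====
def Claim_equal_getPrefs : Prop := ∀ (strList : List String), Dom_getPrefs strList → Spec_getPrefs strList (getPrefs strList)

-- ===== LEMMAS AND PROOFS =====

-- word[:k+1] is the string of the first k+1 characters
theorem pvSliceTake (w : String) (k : Nat) :
    PySem.Str.slice w none (some ((k:Int) + 1)) = String.ofList (w.toList.take (k + 1)) := by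
  have h : ((k:Int) + 1) = ((k + 1 : Nat) : Int) := by push_cast; ring
  rw [PySem.Str.slice, h, PySem.Chars.slice_eq_listSlice, PySem.List.slice_to_natCast]

-- A's wordPrefs list, written over List.range and take
theorem pvWordPrefs_eq (w : String) :
    (PySem.List.pyRange 0 (PySem.Str.len w) 1).map (fun i => PySem.Str.slice w none (some (i + 1)))
      = (List.range w.toList.length).map (fun k => String.ofList (w.toList.take (k + 1))) := by
  have hlen : PySem.Str.len w = (w.toList.length : Int) := by simp [PySem.Str.len]
  rw [hlen, PySem.List.pyRange_one, List.map_map]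
  simp only [Int.sub_zero, Int.toNat_natCast]
  refine List.map_congr_left (fun k _ => ?_)
  simp only [Function.comp_apply, Int.zero_add]
  exact pvSliceTake w k

-- B's char loop adds exactly the prefixes p ++ take (k+1) cs, in order
theorem pvCharLoop (cs : List Char) : ∀ (p : List Char) (s : PySem.Set String),
    (cs.foldl
        (fun st ch =>
          let acc := st.1 ++ [ch]
          (acc, PySem.Set.add st.2 (String.ofList acc)))
        (p, s)).2
      = ((List.range cs.length).map (fun k => String.ofList (p ++ cs.take (k + 1)))).foldl
          PySem.Set.add s := by
  induction cs with
  | nil => intro p s; simp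
  | cons c cs ih =>
    intro p s
    rw [List.foldl_cons, ih (p ++ [c]) (PySem.Set.add s (String.ofList (p ++ [c])))]
    rw [List.length_cons, List.range_succ_eq_map, List.map_cons, List.map_map, List.foldl_cons]
    simp only [List.take_succ_cons, List.take_zero]
    congr 1
    refine List.map_congr_left (fun k _ => ?_)
    simp

theorem getPrefs_spec_aux : ∀ (strList : List String) (s : PySem.Set String),
    strList.foldl (fun prefSet word =>
        ((PySem.List.pyRange 0 (PySem.Str.len word) 1).map
          (fun i => PySem.Str.slice word none (some (i + 1)))).foldl PySem.Set.add prefSet) s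
    = strList.foldl (fun prefSet word =>
        (word.toList.foldl
          (fun st ch =>
            let acc := st.1 ++ [ch]
            (acc, PySem.Set.add st.2 (String.ofList acc)))
          (([] : List Char), prefSet)).2) s := by
  intro strList
  induction strList with
  | nil => intro s; rfl
  | cons w ws ih =>
    intro s
    rw [List.foldl_cons, List.foldl_cons, ih]
    congr 1
    rw [pvCharLoop w.toList [] s, pvWordPrefs_eq w]
    simp

-- ===== VERDICT (by name: the statement is the Claim_ definition above) =====
theorem getPrefs_spec : Claim_equal_getPrefs := by
  intro strList _
  show getPrefs strList = getPrefs_alt strList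
  unfold getPrefs getPrefs_alt
  rw [getPrefs_spec_aux]
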